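-- pv_equiv track=rewrite | github.com/chiahsun/problem_solving | ProjectEuler/48_Self powers/solve.py | get_mult
-- ===== SOURCE A (Python) =====
-- def get_mult(last = 10):
--     mod = 10000000000;
--     res = 0;
--     for i in range(1, last+1):
--         tmp = i;
--         for k in range(i-1):
--              tmp = (tmp * i) % mod;
--         res = (res + tmp) % mod;
--
--     return res;
-- ===== SOURCE B (Python) =====
-- def get_mult(last = 10):
--     mod = 10000000000
--     res = 0
--     for i in range(1, last+1):
--         base = i % mod
--         exp = i
--         result = 1
--         while exp > 0:
--             if exp & 1:
--                 result = result * base % mod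
--             base = base * base % mod
--             exp >>= 1
--         res = (res + result) % mod
--     return res
-- ===== Notes on version B (the rewrite author's own statement) =====
-- stated objective: faster
-- what changed: The inner power computation i^i mod 10^10 is done by binary exponentiation (square-and-multiply over the bits of i) instead of i-1 repeated multiplications.
import Mathlib
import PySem

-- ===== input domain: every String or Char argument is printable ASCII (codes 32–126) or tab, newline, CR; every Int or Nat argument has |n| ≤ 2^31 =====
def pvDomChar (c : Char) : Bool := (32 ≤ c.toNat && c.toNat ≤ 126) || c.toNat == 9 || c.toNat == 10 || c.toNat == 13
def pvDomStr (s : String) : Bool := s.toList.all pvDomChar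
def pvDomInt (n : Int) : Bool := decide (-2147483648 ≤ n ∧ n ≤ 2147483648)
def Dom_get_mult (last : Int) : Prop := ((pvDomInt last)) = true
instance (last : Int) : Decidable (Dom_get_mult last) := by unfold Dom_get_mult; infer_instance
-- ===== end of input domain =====

-- B replaces A's inner O(i) repeated-multiplication loop by binary exponentiation (square-and-multiply); equal return values.

-- ===== PORT A =====
def get_mult (last : Int) : Int :=
  (PySem.List.pyRange 1 (last + 1) 1).foldl
    (fun res i =>
      let tmp := (PySem.List.pyRange 0 (i - 1) 1).foldl
        (fun tmp _ => PySem.Int.mod (tmp * i) 10000000000) i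
      PySem.Int.mod (res + tmp) 10000000000) 0

-- ===== PORT B =====
-- the `while exp > 0` loop of Source B; terminates because exp // 2 < exp for exp > 0
def powmodLoop (m base exp result : Int) : Int :=
  if 0 < exp then
    powmodLoop m (PySem.Int.mod (base * base) m) (PySem.Int.floordiv exp 2)
      (if PySem.Int.band exp 1 ≠ 0 then PySem.Int.mod (result * base) m else result)
  else result
termination_by exp.toNat
decreasing_by
  rw [PySem.Int.floordiv_eq_ediv_of_pos (by norm_num)]
  omega

def get_mult_alt (last : Int) : Int :=
  (PySem.List.pyRange 1 (last + 1) 1).foldl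
    (fun res i =>
      PySem.Int.mod (res + powmodLoop 10000000000 (PySem.Int.mod i 10000000000) i 1)
        10000000000) 0

-- ===== PRECONDITION & SPEC =====
def Spec_get_mult (last : Int) (out : Int) : Prop := out = get_mult_alt last
instance (last : Int) (out : Int) : Decidable (Spec_get_mult last out) := by unfold Spec_get_mult; infer_instance

-- ===== CLAIM (what is proved, stated in full; the proofs are below) =====
def Claim_equal_get_mult : Prop := ∀ (last : Int), Dom_get_mult last → Spec_get_mult last (get_mult last)

-- ===== LEMMAS AND PROOFS =====

-- A's inner loop computes t * i^len % m (any list, element unused)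
theorem innerA_eq {m : Int} (hm : 0 < m) (i : Int) :
    ∀ (l : List Int) (t : Int), t % m = t →
      l.foldl (fun tmp _ => PySem.Int.mod (tmp * i) m) t = t * i ^ l.length % m := by
  intro l
  induction l with
  | nil => intro t ht; simpa using ht.symm
  | cons a l ih =>
    intro t ht
    simp only [List.foldl_cons, List.length_cons]
    rw [PySem.Int.mod_eq_emod_of_pos hm, ih _ (Int.emod_emod_of_dvd _ (dvd_refl m))]
    have key : ((t * i) % m * i ^ l.length) % m = (t * i * i ^ l.length) % m := by
      conv_lhs => rw [Int.mul_emod]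
      rw [Int.emod_emod_of_dvd _ dvd_rfl, ← Int.mul_emod]
    rw [key, pow_succ', ← mul_assoc]

-- B's loop computes result * base^exp % m (for reduced result)
theorem powmodLoop_eq {m : Int} (hm : 1 < m) :
    ∀ (e : Nat) (base exp result : Int), exp.toNat = e → result % m = result →
      powmodLoop m base exp result = result * base ^ exp.toNat % m := by
  intro e
  induction e using Nat.strong_induction_on with
  | _ e ih =>
    intro base exp result he hr
    have hm0 : (0:Int) < m := by omega
    have hbsq : ∀ k : Nat, ((base * base) % m) ^ k % m = (base ^ 2) ^ k % m := by
      intro k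
      have h1 : Int.ModEq m ((base * base) % m) (base * base) :=
        Int.emod_emod_of_dvd (base * base) dvd_rfl
      simpa [sq] using h1.pow k
    rw [powmodLoop, PySem.Int.band_one]
    simp only [PySem.Int.mod_eq_emod_of_pos hm0,
      PySem.Int.mod_eq_emod_of_pos (show (0:Int) < 2 by norm_num),
      PySem.Int.floordiv_eq_ediv_of_pos (show (0:Int) < 2 by norm_num)]
    split_ifs with h hodd
    · -- exp > 0, odd bit set
      have hlt : (exp / 2).toNat < e := by omega
      rw [ih _ hlt _ _ _ rfl (Int.emod_emod_of_dvd _ dvd_rfl)]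
      rw [Int.mul_emod, hbsq, Int.emod_emod_of_dvd _ dvd_rfl, ← Int.mul_emod,
          ← pow_mul, mul_assoc, ← pow_succ']
      have hE : exp.toNat = 2 * (exp / 2).toNat + 1 := by omega
      rw [hE]
    · -- exp > 0, even
      have hlt : (exp / 2).toNat < e := by omega
      rw [ih _ hlt _ _ _ rfl hr]
      rw [Int.mul_emod, hbsq, ← Int.mul_emod, ← pow_mul]
      have hE : exp.toNat = 2 * (exp / 2).toNat := by omega
      rw [hE]
    · -- exp ≤ 0
      have hE : exp.toNat = 0 := by omega
      rw [hE]; simpa using hr.symm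

-- per-term agreement: for 1 ≤ i < m both inner computations give i^(i.toNat) % m
theorem term_eq {m : Int} (hm : 1 < m) (i : Int) (h1 : 1 ≤ i) (h2 : i < m) :
    (PySem.List.pyRange 0 (i - 1) 1).foldl
        (fun tmp _ => PySem.Int.mod (tmp * i) m) i
      = powmodLoop m (PySem.Int.mod i m) i 1 := by
  have hm0 : (0:Int) < m := by omega
  have hi : i % m = i := Int.emod_eq_of_lt (by omega) h2
  rw [innerA_eq hm0 i _ i hi, powmodLoop_eq hm i.toNat _ i 1 rfl (Int.emod_eq_of_lt (by norm_num) hm),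
      PySem.List.length_pyRange_one, PySem.Int.mod_eq_emod_of_pos hm0, hi, one_mul]
  have hE : (i - 1 - 0).toNat + 1 = i.toNat := by omega
  rw [← hE, pow_succ']

-- ===== VERDICT (by name: the statement is the Claim_ definition above) =====
theorem get_mult_spec : Claim_equal_get_mult := by
  intro last hdom
  unfold Spec_get_mult get_mult get_mult_alt
  apply PySem.List.foldl_congr_mem
  intro res i hi
  rw [PySem.List.mem_pyRange_one] at hi
  have hlast : last ≤ 2147483648 := by
    have h := hdom
    simp only [Dom_get_mult, pvDomInt, decide_eq_true_eq] at h
    exact h.2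
  rw [term_eq (by norm_num) i hi.1 (by omega)]
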